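-- pv_equiv track=rewrite | github.com/Ernestnzx/rosalind | textbook/ba6i.py | graph_to_genome
-- ===== SOURCE A (Python) =====
-- def cycle_to_chromosome(nodes):
--     chromosome = []
--     if abs(nodes[0] - nodes[-1]) == 1: nodes = nodes[-1:] + nodes[:-1]
--     for i in range(len(nodes)//2):
--         if nodes[2*i] < nodes[2*i+1]: chromosome.append(nodes[2*i+1]//2)
--         else: chromosome.append((-nodes[(2*i)]//2))
--     return chromosome
--
-- def dfs(u,vis,al,cycle):
--     vis.add(u); cycle[-1].append(u)
--     for v in al[u]:
--         if v not in vis: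
--             dfs(v,vis,al,cycle)
--
-- def graph_to_genome(g):
--     al,p,vis,cycles = {},set(),set(),[]
--     for u,v in g:
--         al.setdefault(u,[]).append(v)
--         al.setdefault(v,[]).append(v+1 if v&1 else v-1)
--     for i in range(1,len(al)):
--         if i in vis: continue
--         cycles.append([])
--         dfs(i,vis,al,cycles)
--     return [tuple(cycle_to_chromosome(cycle)) for cycle in cycles]
-- ===== SOURCE B (Python) =====
-- def _pairs(ns):
--     if len(ns) < 2:
--         return []
--     a, b, *rest = ns
--     return [b // 2 if a < b else -a // 2] + _pairs(rest)
--
-- def cycle_to_chromosome(nodes):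
--     if abs(nodes[0] - nodes[-1]) == 1:
--         nodes = nodes[-1:] + nodes[:-1]
--     return _pairs(nodes)
--
-- def graph_to_genome(g):
--     al = {}
--     for u, v in g:
--         al.setdefault(u, []).append(v)
--         al.setdefault(v, []).append(v + 1 if v & 1 else v - 1)
--     vis = set()
--     genome = []
--     for i in range(1, len(al)):
--         if i in vis:
--             continue
--         cycle = []
--         stack = [i]
--         while stack:
--             u = stack.pop()
--             if u in vis:
--                 continue
--             vis.add(u)
--             cycle.append(u)
--             stack.extend(reversed(al[u]))
--         genome.append(tuple(cycle_to_chromosome(cycle)))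
--     return genome
-- ===== Notes on version B (the rewrite author's own statement) =====
-- stated objective: alternative
-- what changed: The recursive dfs is replaced by an explicit stack traversal (push start, pop, mark/append on first entry, push neighbors reversed to keep the recursion's pre-order), and cycle_to_chromosome's index loop over range(len//2) is replaced by structural two-at-a-time recursion over the node list.
-- outside the precondition, e.g. on graph_to_genome([(6, 6), (2, 1)]): A returns [(-1,)], B returns [(-1,)]
import Mathlib
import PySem

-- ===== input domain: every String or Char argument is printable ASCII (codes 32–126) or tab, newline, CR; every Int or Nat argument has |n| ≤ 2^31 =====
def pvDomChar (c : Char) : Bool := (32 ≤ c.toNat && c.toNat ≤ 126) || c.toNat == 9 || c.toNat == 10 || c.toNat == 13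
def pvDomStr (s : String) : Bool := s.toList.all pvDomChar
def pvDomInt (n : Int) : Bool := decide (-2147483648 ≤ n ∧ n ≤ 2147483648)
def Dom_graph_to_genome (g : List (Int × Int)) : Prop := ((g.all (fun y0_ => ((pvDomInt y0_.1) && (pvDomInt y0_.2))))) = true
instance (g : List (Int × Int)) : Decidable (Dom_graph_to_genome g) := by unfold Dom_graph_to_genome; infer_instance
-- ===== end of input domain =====

-- B replaces A's recursive dfs by an explicit stack traversal (and builds each chromosome by
-- structural two-at-a-time recursion instead of an index loop); same return value, no speed claim.

-- `v + 1 if v & 1 else v - 1` (shared by both Pythons verbatim)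
def pvPartner (v : Int) : Int := if PySem.Int.band v 1 ≠ 0 then v + 1 else v - 1

-- `al.setdefault(u,[]).append(x)` is exactly `d[u] = d.get(u,[]) + [x]` = Dict.modify
def pvBuildAl (g : List (Int × Int)) : PySem.Dict Int (List Int) :=
  g.foldl (fun d uv =>
      (d.modify uv.1 [] (· ++ [uv.2])).modify uv.2 [] (· ++ [pvPartner uv.2]))
    PySem.Dict.empty

-- ===== PORT A =====
-- A's cycle_to_chromosome: index loop over range(len(nodes)//2)
def pvC2C_A (nodes : List Int) : List Int :=
  let nodes := if (PySem.List.pyGetD nodes 0 0 - PySem.List.pyGetD nodes (-1) 0).natAbs = 1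
               then PySem.List.slice nodes (some (-1)) none ++ PySem.List.slice nodes none (some (-1))
               else nodes
  (PySem.List.pyRange 0 (PySem.Int.floordiv (nodes.length : Int) 2) 1).foldl
    (fun ch i =>
      if PySem.List.pyGetD nodes (2 * i) 0 < PySem.List.pyGetD nodes (2 * i + 1) 0
      then ch ++ [PySem.Int.floordiv (PySem.List.pyGetD nodes (2 * i + 1) 0) 2]
      else ch ++ [PySem.Int.floordiv (-(PySem.List.pyGetD nodes (2 * i) 0)) 2]) []

-- termination measure for the recursive dfs: keys of al not yet visited
def pvM (al : PySem.Dict Int (List Int)) (vis : PySem.Set Int) : Nat :=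
  al.keys.countP (fun k => !(PySem.Set.contains vis k))

theorem pvSubset_add {vis : PySem.Set Int} {u : Int} : vis ⊆ PySem.Set.add vis u :=
  fun _ hx => (PySem.Set.mem_add vis u _).2 (Or.inl hx)

theorem pvNotContains_iff {s : PySem.Set Int} {x : Int} :
    PySem.Set.contains s x = false ↔ x ∉ s := by
  rw [← Bool.not_eq_true, not_iff_not]
  exact PySem.Set.contains_iff s x

theorem pvM_le {al : PySem.Dict Int (List Int)} {vis vis' : PySem.Set Int}
    (h : vis ⊆ vis') : pvM al vis' ≤ pvM al vis := by
  apply List.countP_mono_left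
  intro x _ hx
  simp only [Bool.not_eq_eq_eq_not, Bool.not_true] at hx ⊢
  exact pvNotContains_iff.2 (fun hm => pvNotContains_iff.1 hx (h hm))

theorem pvCountP_lt {l : List Int} {p q : Int → Bool} {u : Int}
    (hpq : ∀ x, p x = true → q x = true) (hu : u ∈ l) (hq : q u = true) (hp : p u = false) :
    l.countP p < l.countP q := by
  induction l with
  | nil => cases hu
  | cons a t ih =>
    have hmono : t.countP p ≤ t.countP q := List.countP_mono_left (fun x _ h => hpq x h)
    rcases List.mem_cons.1 hu with rfl | hm
    · rw [List.countP_cons_of_neg (by simp [hp]), List.countP_cons_of_pos (by simp [hq])]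
      omega
    · have h2 := ih hm
      by_cases hpa : p a = true
      · rw [List.countP_cons_of_pos hpa, List.countP_cons_of_pos (hpq a hpa)]; omega
      · rw [List.countP_cons_of_neg hpa]
        by_cases hqa : q a = true
        · rw [List.countP_cons_of_pos hqa]; omega
        · rw [List.countP_cons_of_neg hqa]; omega

theorem pvM_add_lt {al : PySem.Dict Int (List Int)} {vis : PySem.Set Int} {u : Int}
    (hv : PySem.Set.contains vis u = false) (hk : al.contains u = true) :
    pvM al (PySem.Set.add vis u) < pvM al vis := by
  apply pvCountP_lt (u := u)
  · intro x hx
    simp only [Bool.not_eq_eq_eq_not, Bool.not_true] at hx ⊢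
    exact pvNotContains_iff.2 (fun hm => pvNotContains_iff.1 hx (pvSubset_add hm))
  · exact (PySem.Dict.contains_iff_mem_keys al u).1 hk
  · show (!PySem.Set.contains vis u) = true
    rw [hv]; rfl
  · have h2 : PySem.Set.contains (PySem.Set.add vis u) u = true :=
      (PySem.Set.contains_iff _ _).2 ((PySem.Set.mem_add vis u u).2 (Or.inr rfl))
    show (!PySem.Set.contains (PySem.Set.add vis u) u) = false
    rw [h2]; rfl

theorem pvM_add_eq_of_not_key {al : PySem.Dict Int (List Int)} {vis : PySem.Set Int} {u : Int}
    (hk : al.contains u = false) :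
    pvM al (PySem.Set.add vis u) = pvM al vis := by
  apply List.countP_congr
  intro x hx
  have hxu : x ≠ u := by
    rintro rfl
    exact absurd ((PySem.Dict.contains_iff_mem_keys al x).2 hx) (by simp [hk])
  have hmem : x ∈ PySem.Set.add vis u ↔ x ∈ vis := by
    rw [PySem.Set.mem_add]
    exact or_iff_left hxu
  rcases h : PySem.Set.contains vis x with _ | _
  · have h2 : PySem.Set.contains (PySem.Set.add vis u) x = false :=
      pvNotContains_iff.2 (fun hm => pvNotContains_iff.1 h (hmem.1 hm))
    rw [h2]
  · have h2 : PySem.Set.contains (PySem.Set.add vis u) x = true :=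
      (PySem.Set.contains_iff _ _).2 (hmem.2 ((PySem.Set.contains_iff _ _).1 h))
    rw [h2]

-- A's dfs, with the `for v in al[u]` loop written as recursion on the neighbour list:
-- pvDfsA processes a pending neighbour list; entering an unvisited v does exactly
-- `vis.add(v); cycle[-1].append(v)` and then descends into al[v] before the rest.
def pvDfsA (al : PySem.Dict Int (List Int)) :
    (vs : List Int) → (vis : PySem.Set Int) → (c : List Int) →
    {p : PySem.Set Int × List Int // vis ⊆ p.1}
  | [], vis, c => ⟨(vis, c), by simp⟩
  | v :: rest, vis, c =>
    if hv : PySem.Set.contains vis v then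
      let r := pvDfsA al rest vis c
      ⟨r.1, r.2⟩
    else
      let r := pvDfsA al (al.getD v []) (PySem.Set.add vis v) (c ++ [v])
      let r2 := pvDfsA al rest r.1.1 r.1.2
      ⟨r2.1, fun x hx => r2.2 (r.2 (pvSubset_add hx))⟩
  termination_by vs vis c => (pvM al vis, vs.length)
  decreasing_by
  · exact Prod.Lex.right _ (by simp)
  · by_cases hk : al.contains v = true
    · exact Prod.Lex.left _ _ (pvM_add_lt (by simpa using hv) hk)
    · rw [PySem.Dict.getD_of_not_contains al [] (by simpa using hk),
        pvM_add_eq_of_not_key (by simpa using hk)]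
      exact Prod.Lex.right _ (by simp)
  · rcases lt_or_eq_of_le (pvM_le (fun x hx => r.2 (pvSubset_add hx))) with h | h
    · exact Prod.Lex.left _ _ h
    · rw [h]; exact Prod.Lex.right _ (by simp)

-- `dfs(u, vis, al, cycles)` right after `cycles.append([])`: add u, open the cycle with u
def pvDfs (al : PySem.Dict Int (List Int)) (u : Int) (vis : PySem.Set Int) :
    {p : PySem.Set Int × List Int // vis ⊆ p.1} :=
  let r := pvDfsA al (al.getD u []) (PySem.Set.add vis u) ([] ++ [u])
  ⟨r.1, fun x hx => r.2 (pvSubset_add hx)⟩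

def graph_to_genome (g : List (Int × Int)) : List (List Int) :=
  let al := pvBuildAl g
  let s := (PySem.List.pyRange 1 (al.size : Int) 1).foldl
    (fun s i =>
      if PySem.Set.contains s.1 i then s
      else
        let r := pvDfs al i s.1
        (r.1.1, s.2 ++ [r.1.2]))
    ((PySem.Set.empty : PySem.Set Int), ([] : List (List Int)))
  s.2.map pvC2C_A

-- ===== PORT B =====
-- B's _pairs: structural recursion, two nodes at a time
def pvPairs : List Int → List Int
  | a :: b :: rest =>
    (if a < b then PySem.Int.floordiv b 2 else PySem.Int.floordiv (-a) 2) :: pvPairs rest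
  | _ => []

def pvC2C_B (nodes : List Int) : List Int :=
  let nodes := if (PySem.List.pyGetD nodes 0 0 - PySem.List.pyGetD nodes (-1) 0).natAbs = 1
               then PySem.List.slice nodes (some (-1)) none ++ PySem.List.slice nodes none (some (-1))
               else nodes
  pvPairs nodes

-- B's while-loop over the explicit stack; the Lean list's head is the stack's top, so
-- `stack.extend(reversed(al[u]))` followed by popping is `al[u] ++ st` consumed left to right.
def pvStack (al : PySem.Dict Int (List Int)) :
    (stack : List Int) → (vis : PySem.Set Int) → (c : List Int) → PySem.Set Int × List Int
  | [], vis, c => (vis, c)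
  | u :: st, vis, c =>
    if hv : PySem.Set.contains vis u then pvStack al st vis c
    else pvStack al (al.getD u [] ++ st) (PySem.Set.add vis u) (c ++ [u])
  termination_by stack vis c => (pvM al vis, stack.length)
  decreasing_by
  · exact Prod.Lex.right _ (by simp)
  · by_cases hk : al.contains u = true
    · exact Prod.Lex.left _ _ (pvM_add_lt (by simpa using hv) hk)
    · rw [PySem.Dict.getD_of_not_contains al [] (by simpa using hk),
        pvM_add_eq_of_not_key (by simpa using hk)]
      exact Prod.Lex.right _ (by simp)

def graph_to_genome_alt (g : List (Int × Int)) : List (List Int) :=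
  let al := pvBuildAl g
  let s := (PySem.List.pyRange 1 (al.size : Int) 1).foldl
    (fun s i =>
      if PySem.Set.contains s.1 i then s
      else
        let r := pvStack al [i] s.1 []
        (r.1, s.2 ++ [pvC2C_B r.2]))
    ((PySem.Set.empty : PySem.Set Int), ([] : List (List Int)))
  s.2

-- ===== PRECONDITION & SPEC =====
-- the distinct endpoints of g, in first-appearance order (= the keys of A's adjacency dict)
def pvNodes (g : List (Int × Int)) : PySem.Set Int :=
  PySem.Set.ofList (g.flatMap (fun p => [p.1, p.2]))

-- Pre_ excludes the inputs on which A's dfs raises KeyError (a node 1..len(al)-1 absent, or a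
-- traversal reaching a node whose partner endpoint is not a node). The partner clause is slightly
-- conservative: it also excludes rare inputs whose missing partner sits on a node the loop never
-- reaches, where A still returns (and B returns the same value).
def Pre_graph_to_genome (g : List (Int × Int)) : Prop :=
  (pvNodes g).length ≤ 1 ∨
    ((∀ i ∈ PySem.List.pyRange 1 ((pvNodes g).length : Int) 1, i ∈ pvNodes g) ∧
     ∀ p ∈ g, pvPartner p.2 ∈ pvNodes g)
instance (g : List (Int × Int)) : Decidable (Pre_graph_to_genome g) := by
  unfold Pre_graph_to_genome; infer_instance

def pvWitness_graph_to_genome : (List (Int × Int)) := [(2, 3), (4, 5), (6, 1)]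

def Spec_graph_to_genome (g : List (Int × Int)) (out : List (List Int)) : Prop := out = graph_to_genome_alt g
instance (g : List (Int × Int)) (out : List (List Int)) : Decidable (Spec_graph_to_genome g out) := by unfold Spec_graph_to_genome; infer_instance

-- ===== CLAIM (what is proved, stated in full; the proofs are below) =====
def Claim_equal_graph_to_genome : Prop := ∀ (g : List (Int × Int)), Dom_graph_to_genome g → Pre_graph_to_genome g → Spec_graph_to_genome g (graph_to_genome g)

-- ===== LEMMAS AND PROOFS =====

-- A's index loop over range(len//2) equals B's two-at-a-time recursion
theorem pvMapRange_eq_pvPairs (ns : List Int) :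
    (List.range (ns.length / 2)).map (fun k =>
      if ns.getD (2 * k) 0 < ns.getD (2 * k + 1) 0
      then PySem.Int.floordiv (ns.getD (2 * k + 1) 0) 2
      else PySem.Int.floordiv (-(ns.getD (2 * k) 0)) 2) = pvPairs ns := by
  induction ns using pvPairs.induct with
  | case1 a b rest ih =>
    have hl : (a :: b :: rest).length / 2 = rest.length / 2 + 1 := by simp; omega
    rw [hl, List.range_succ_eq_map, List.map_cons, List.map_map]
    refine congrArg₂ List.cons rfl ?_
    rw [← ih]
    apply List.map_congr_left
    intro k _
    have h1 : 2 * Nat.succ k = (2 * k + 1) + 1 := by omega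
    have h2 : 2 * Nat.succ k + 1 = (2 * k + 1 + 1) + 1 := by omega
    simp only [Function.comp_def, h1, List.getD_cons_succ]
  | case2 t h =>
    match t, h with
    | [], _ => rfl
    | [a], _ => simp [pvPairs]
    | a :: b :: rest, h => exact absurd rfl (fun hh => h a b rest hh)

theorem pvRangeFold_eq_pvPairs (ns : List Int) :
    (PySem.List.pyRange 0 (PySem.Int.floordiv (ns.length : Int) 2) 1).foldl
      (fun ch i =>
        if PySem.List.pyGetD ns (2 * i) 0 < PySem.List.pyGetD ns (2 * i + 1) 0
        then ch ++ [PySem.Int.floordiv (PySem.List.pyGetD ns (2 * i + 1) 0) 2]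
        else ch ++ [PySem.Int.floordiv (-(PySem.List.pyGetD ns (2 * i) 0)) 2]) []
      = pvPairs ns := by
  have hdiv : PySem.Int.floordiv (ns.length : Int) 2 = ((ns.length / 2 : Nat) : Int) := by
    exact_mod_cast PySem.Int.floordiv_natCast ns.length 2
  have hcong := PySem.List.foldl_congr_mem
    (l := PySem.List.pyRange 0 ((ns.length / 2 : Nat) : Int) 1) (init := ([] : List Int))
    (f := fun ch i =>
      if PySem.List.pyGetD ns (2 * i) 0 < PySem.List.pyGetD ns (2 * i + 1) 0
      then ch ++ [PySem.Int.floordiv (PySem.List.pyGetD ns (2 * i + 1) 0) 2]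
      else ch ++ [PySem.Int.floordiv (-(PySem.List.pyGetD ns (2 * i) 0)) 2])
    (g := fun ch i =>
      ch ++ [if PySem.List.pyGetD ns (2 * i) 0 < PySem.List.pyGetD ns (2 * i + 1) 0
             then PySem.Int.floordiv (PySem.List.pyGetD ns (2 * i + 1) 0) 2
             else PySem.Int.floordiv (-(PySem.List.pyGetD ns (2 * i) 0)) 2])
    (fun acc x _ => by beta_reduce; split <;> rfl)
  rw [hdiv, hcong, PySem.List.foldl_append_singleton_eq_map, PySem.List.pyRange_zero_natCast,
    List.map_map, List.nil_append]
  rw [← pvMapRange_eq_pvPairs ns]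
  apply List.map_congr_left
  intro k _
  have e1 : (2 : Int) * (k : Int) = ((2 * k : Nat) : Int) := by push_cast; ring
  have e2 : ((2 * k : Nat) : Int) + 1 = ((2 * k + 1 : Nat) : Int) := by push_cast; ring
  simp only [Function.comp_def, e1, e2, PySem.List.pyGetD_natCast]

theorem pvC2C_eq (ns : List Int) : pvC2C_A ns = pvC2C_B ns := by
  unfold pvC2C_A pvC2C_B
  exact pvRangeFold_eq_pvPairs _

-- the stack loop runs the recursive dfs on the top segment, then continues with the rest
theorem pvStack_append (al : PySem.Dict Int (List Int)) (vs : List Int) (vis : PySem.Set Int)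
    (c : List Int) :
    ∀ rest, pvStack al (vs ++ rest) vis c =
      pvStack al rest (pvDfsA al vs vis c).1.1 (pvDfsA al vs vis c).1.2 := by
  induction vs, vis, c using pvDfsA.induct al with
  | case1 vis c =>
    intro rest
    simp [pvDfsA]
  | case2 v rest' vis c hv ih =>
    intro rest
    have hm : v ∈ vis := (PySem.Set.contains_iff _ _).1 hv
    rw [List.cons_append]
    rw [show pvStack al (v :: (rest' ++ rest)) vis c = pvStack al (rest' ++ rest) vis c from by
      rw [pvStack, dif_pos hv]]
    rw [ih rest]
    simp [pvDfsA, hm]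
  | case3 v rest' vis c hv r ihn ihr _ =>
    intro rest
    have hm : v ∉ vis := fun h => hv ((PySem.Set.contains_iff _ _).2 h)
    rw [List.cons_append]
    rw [show pvStack al (v :: (rest' ++ rest)) vis c
        = pvStack al (al.getD v [] ++ (rest' ++ rest)) (PySem.Set.add vis v) (c ++ [v]) from by
      rw [pvStack, dif_neg hv]]
    rw [ihn (rest' ++ rest), ihr rest]
    simp only [pvDfsA]
    rw [dif_neg hv]

theorem pvStack_singleton (al : PySem.Dict Int (List Int)) (i : Int) (vis : PySem.Set Int)
    (h : PySem.Set.contains vis i = false) :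
    pvStack al [i] vis [] = (pvDfs al i vis).1 := by
  rw [show pvStack al [i] vis []
      = pvStack al (al.getD i [] ++ []) (PySem.Set.add vis i) ([] ++ [i]) from by
    rw [pvStack, dif_neg (fun hc => pvNotContains_iff.1 h ((PySem.Set.contains_iff _ _).1 hc))]]
  rw [pvStack_append al (al.getD i []) (PySem.Set.add vis i) ([] ++ [i]) []]
  rw [pvStack]
  rfl

-- the outer loops agree: B's state is A's with each finished cycle already converted
theorem pvOuter (al : PySem.Dict Int (List Int)) (l : List Int) :
    ∀ (vis : PySem.Set Int) (cycles : List (List Int)),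
      l.foldl (fun s i =>
          if PySem.Set.contains s.1 i then s
          else
            let r := pvStack al [i] s.1 []
            (r.1, s.2 ++ [pvC2C_B r.2])) (vis, cycles.map pvC2C_A)
      = ((l.foldl (fun s i =>
            if PySem.Set.contains s.1 i then s
            else
              let r := pvDfs al i s.1
              (r.1.1, s.2 ++ [r.1.2])) (vis, cycles)).1,
         (l.foldl (fun s i =>
            if PySem.Set.contains s.1 i then s
            else
              let r := pvDfs al i s.1
              (r.1.1, s.2 ++ [r.1.2])) (vis, cycles)).2.map pvC2C_A) := by
  induction l with
  | nil => intro vis cycles; rfl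
  | cons i t ih =>
    intro vis cycles
    rcases hv : PySem.Set.contains vis i with _ | _
    · simp only [List.foldl_cons, hv, Bool.false_eq_true, if_false]
      rw [pvStack_singleton al i vis hv, pvC2C_eq ((pvDfs al i vis).1.2) |>.symm]
      rw [show cycles.map pvC2C_A ++ [pvC2C_A (pvDfs al i vis).1.2]
          = (cycles ++ [(pvDfs al i vis).1.2]).map pvC2C_A from by simp]
      exact ih (pvDfs al i vis).1.1 (cycles ++ [(pvDfs al i vis).1.2])
    · simp only [List.foldl_cons, hv, if_true]
      exact ih vis cycles

theorem graph_to_genome_spec' (g : List (Int × Int)) :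
    graph_to_genome g = graph_to_genome_alt g := by
  simp only [graph_to_genome, graph_to_genome_alt]
  have h := pvOuter (pvBuildAl g) (PySem.List.pyRange 1 ((pvBuildAl g).size : Int) 1)
    PySem.Set.empty []
  simp only [List.map_nil] at h
  rw [h]

-- ===== VERDICT (by name: the statement is the Claim_ definition above) =====
theorem graph_to_genome_spec : Claim_equal_graph_to_genome := by
  intro g _ _
  unfold Spec_graph_to_genome
  exact graph_to_genome_spec' g
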